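-- pv_equiv track=rewrite | github.com/asunder123/documentintelligence | decision/chain_builder.py | build_chains
-- ===== SOURCE A (Python) =====
-- def build_chains(sentences_with_roles):
--     """
--     sentences_with_roles:
--     [(sentence, role), ...]
--
--     Returns:
--     List of chains like:
--     { "CAUSE": ..., "ACTION": ..., "OUTCOME": ... }
--     """
--
--     chains = []
--     current = {}
--
--     for sentence, role in sentences_with_roles:
--         if role == "CAUSE":
--             if current:
--                 chains.append(current)
--             current = {"CAUSE": sentence}
--
--         elif role in ("ACTION", "OUTCOME"):
--             current[role] = sentence
--
--     if current:
--         chains.append(current)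
--
--     return chains
-- ===== SOURCE B (Python) =====
-- def build_chains(sentences_with_roles):
--     KEEP = ("CAUSE", "ACTION", "OUTCOME")
--     # Phase 1: partition into consecutive segments; each CAUSE opens a new segment.
--     segments = [[]]
--     for item in sentences_with_roles:
--         if item[1] == "CAUSE":
--             segments.append([item])
--         else:
--             segments[-1].append(item)
--     # Phase 2: reduce each segment to a role->sentence dict; keep the non-empty ones.
--     chains = []
--     for seg in segments:
--         chain = {role: sentence for sentence, role in seg if role in KEEP}
--         if chain:
--             chains.append(chain)
--     return chains
-- ===== Notes on version B (the rewrite author's own statement) =====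
-- stated objective: alternative
-- what changed: Replaces A's single stateful pass (mutable current dict flushed at each CAUSE and at the end) by a two-phase pipeline: first partition the input into consecutive segments opened by each CAUSE, then map each segment to a dict via a comprehension and keep the non-empty ones.
import Mathlib
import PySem

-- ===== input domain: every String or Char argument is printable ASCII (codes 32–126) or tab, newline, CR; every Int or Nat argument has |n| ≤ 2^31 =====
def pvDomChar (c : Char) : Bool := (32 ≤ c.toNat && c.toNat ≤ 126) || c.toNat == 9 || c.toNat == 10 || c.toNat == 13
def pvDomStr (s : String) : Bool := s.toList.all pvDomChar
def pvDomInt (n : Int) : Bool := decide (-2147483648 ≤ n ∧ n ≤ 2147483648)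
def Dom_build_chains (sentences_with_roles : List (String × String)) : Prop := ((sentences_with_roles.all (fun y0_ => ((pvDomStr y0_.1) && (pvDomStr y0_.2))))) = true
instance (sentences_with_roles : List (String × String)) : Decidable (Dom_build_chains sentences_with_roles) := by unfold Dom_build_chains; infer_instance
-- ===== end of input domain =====

-- B replaces A's single stateful pass by a two-phase pipeline (segment at each CAUSE, then
-- reduce each segment to a dict); alternative decomposition, same cost, same return value.

-- ===== PORT A =====
-- one iteration of A's for-loop over (chains, current)
def pvAStep (st : List (PySem.Dict String String) × PySem.Dict String String)
    (sr : String × String) : List (PySem.Dict String String) × PySem.Dict String String :=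
  if sr.2 == "CAUSE" then
    ((if st.2.items = [] then st.1 else st.1 ++ [st.2]), PySem.Dict.ofList [("CAUSE", sr.1)])
  else if sr.2 == "ACTION" || sr.2 == "OUTCOME" then
    (st.1, st.2.insert sr.2 sr.1)
  else st

-- A's trailing 'if current: chains.append(current)'
def pvAFinish (st : List (PySem.Dict String String) × PySem.Dict String String) :
    List (PySem.Dict String String) :=
  if st.2.items = [] then st.1 else st.1 ++ [st.2]

def build_chains (sentences_with_roles : List (String × String)) : List (List (String × String)) :=
  (pvAFinish (sentences_with_roles.foldl pvAStep ([], PySem.Dict.empty))).map (·.items)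

-- ===== PORT B =====
-- phase 1 step: a CAUSE item opens a new segment, anything else joins the last one
def pvSegStep (segs : List (List (String × String))) (item : String × String) :
    List (List (String × String)) :=
  if item.2 == "CAUSE" then segs ++ [[item]]
  else segs.dropLast ++ [segs.getLastD [] ++ [item]]

-- phase 2: the dict comprehension {role: sentence for sentence, role in seg if role in KEEP}
def pvChainOf (seg : List (String × String)) : PySem.Dict String String :=
  seg.foldl
    (fun d p => if p.2 == "CAUSE" || p.2 == "ACTION" || p.2 == "OUTCOME" then d.insert p.2 p.1 else d)
    PySem.Dict.empty

def build_chains_alt (sentences_with_roles : List (String × String)) : List (List (String × String)) :=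
  (((sentences_with_roles.foldl pvSegStep [[]]).foldl
      (fun acc seg => if (pvChainOf seg).items = [] then acc else acc ++ [pvChainOf seg]) [])).map (·.items)

-- ===== PRECONDITION & SPEC =====
def Spec_build_chains (sentences_with_roles : List (String × String)) (out : List (List (String × String))) : Prop := out = build_chains_alt sentences_with_roles
instance (sentences_with_roles : List (String × String)) (out : List (List (String × String))) : Decidable (Spec_build_chains sentences_with_roles out) := by unfold Spec_build_chains; infer_instance

-- ===== CLAIM (what is proved, stated in full; the proofs are below) =====
def Claim_equal_build_chains : Prop := ∀ (sentences_with_roles : List (String × String)), Dom_build_chains sentences_with_roles → Spec_build_chains sentences_with_roles (build_chains sentences_with_roles)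

-- ===== LEMMAS AND PROOFS =====

-- reference function: the list of chains produced from the rest of the input,
-- given the chain accumulated so far
def pvProc (current : PySem.Dict String String) :
    List (String × String) → List (PySem.Dict String String)
  | [] => if current.items = [] then [] else [current]
  | sr :: rest =>
    if sr.2 == "CAUSE" then
      (if current.items = [] then [] else [current]) ++ pvProc (PySem.Dict.ofList [("CAUSE", sr.1)]) rest
    else if sr.2 == "ACTION" || sr.2 == "OUTCOME" then
      pvProc (current.insert sr.2 sr.1) rest
    else pvProc current rest

-- the segments that phase 1 of B produces, with cur the (still open) last segment
def pvSegsFrom (cur : List (String × String)) :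
    List (String × String) → List (List (String × String))
  | [] => [cur]
  | sr :: rest =>
    if sr.2 == "CAUSE" then cur :: pvSegsFrom [sr] rest
    else pvSegsFrom (cur ++ [sr]) rest

-- what B's second loop produces from a list of segments
def pvEmit : List (List (String × String)) → List (PySem.Dict String String)
  | [] => []
  | seg :: rest => (if (pvChainOf seg).items = [] then [] else [pvChainOf seg]) ++ pvEmit rest

lemma pvA_loop (xs : List (String × String)) :
    ∀ (chains : List (PySem.Dict String String)) (current : PySem.Dict String String),
      pvAFinish (xs.foldl pvAStep (chains, current)) = chains ++ pvProc current xs := by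
  induction xs with
  | nil =>
    intro chains current
    simp [pvAFinish, pvProc]
    split <;> simp
  | cons sr rest ih =>
    intro chains current
    simp only [List.foldl_cons, pvAStep, pvProc]
    by_cases h1 : (sr.2 == "CAUSE") = true
    · simp only [h1, if_true, ih]
      split_ifs <;> simp
    · simp only [h1, Bool.false_eq_true, if_false]
      by_cases h2 : (sr.2 == "ACTION" || sr.2 == "OUTCOME") = true
      · simp [h2, ih]
      · simp [h2, ih]

lemma pvB_segs (xs : List (String × String)) :
    ∀ (segs : List (List (String × String))) (cur : List (String × String)),
      xs.foldl pvSegStep (segs ++ [cur]) = segs ++ pvSegsFrom cur xs := by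
  induction xs with
  | nil => intro segs cur; simp [pvSegsFrom]
  | cons sr rest ih =>
    intro segs cur
    simp only [List.foldl_cons, pvSegStep, pvSegsFrom]
    by_cases h1 : (sr.2 == "CAUSE") = true
    · simp only [h1, if_true]
      have := ih (segs ++ [cur]) [sr]
      simpa using this
    · simp only [h1, Bool.false_eq_true, if_false]
      rw [List.dropLast_concat, List.getLastD_concat, ih]

lemma pvB_emit (segs : List (List (String × String))) :
    ∀ (acc : List (PySem.Dict String String)),
      segs.foldl
        (fun acc seg => if (pvChainOf seg).items = [] then acc else acc ++ [pvChainOf seg]) acc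
        = acc ++ pvEmit segs := by
  induction segs with
  | nil => intro acc; simp [pvEmit]
  | cons seg rest ih =>
    intro acc
    simp only [List.foldl_cons, pvEmit]
    split <;> simp [ih]

lemma pvChainOf_append (cur : List (String × String)) (sr : String × String) :
    pvChainOf (cur ++ [sr]) =
      (if sr.2 == "CAUSE" || sr.2 == "ACTION" || sr.2 == "OUTCOME" then
        (pvChainOf cur).insert sr.2 sr.1 else pvChainOf cur) := by
  simp [pvChainOf]

lemma pvB_proc (xs : List (String × String)) :
    ∀ (cur : List (String × String)),
      pvEmit (pvSegsFrom cur xs) = pvProc (pvChainOf cur) xs := by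
  induction xs with
  | nil => intro cur; simp [pvSegsFrom, pvEmit, pvProc]
  | cons sr rest ih =>
    intro cur
    simp only [pvSegsFrom, pvProc]
    by_cases h1 : (sr.2 == "CAUSE") = true
    · have hs : sr.2 = "CAUSE" := by simpa using h1
      have hlit : pvChainOf [sr] = PySem.Dict.ofList [("CAUSE", sr.1)] := by
        simp [pvChainOf, hs, PySem.Dict.ofList, PySem.Dict.update, PySem.Dict.insert,
          PySem.Dict.empty, PySem.Dict.contains]
      simp only [h1, if_true, pvEmit]
      rw [← hlit, ih, hlit]
    · simp only [h1, Bool.false_eq_true, if_false]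
      by_cases h2 : (sr.2 == "ACTION" || sr.2 == "OUTCOME") = true
      · simp only [h2, if_true]
        rw [ih, pvChainOf_append]
        simp [h1, h2]
      · simp only [h2, Bool.false_eq_true, if_false]
        rw [ih, pvChainOf_append]
        simp [h1, h2]

-- ===== VERDICT (by name: the statement is the Claim_ definition above) =====
theorem build_chains_spec : Claim_equal_build_chains := by
  intro xs _
  show build_chains xs = build_chains_alt xs
  unfold build_chains build_chains_alt
  rw [pvA_loop xs [] PySem.Dict.empty]
  have hsegs : xs.foldl pvSegStep [[]] = pvSegsFrom [] xs := by
    simpa using pvB_segs xs [] []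
  rw [hsegs, pvB_emit (pvSegsFrom [] xs) [], pvB_proc xs []]
  have h0 : pvChainOf [] = PySem.Dict.empty := rfl
  rw [h0]
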